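-- pv_equiv track=rewrite | github.com/jiacheng-xu/text-sum-uncertainty | attention_y_entropy.py | detect_useless_ids
-- ===== SOURCE A (Python) =====
-- def detect_useless_ids(indices):
--     last = -100
--     good_indices = []
--     for x in indices:
--         if x - 5 > last:
--             last = x
--             good_indices.append(x)
--         else:
--             break
--     return good_indices
-- ===== SOURCE B (Python) =====
-- def detect_useless_ids(indices):
--     def go(prev, rest):
--         if rest and rest[0] - 5 > prev:
--             return [rest[0]] + go(rest[0], rest[1:])
--         return []
--     return go(-100, list(indices))
-- ===== Notes on version B (the rewrite author's own statement) =====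
-- stated objective: alternative
-- what changed: Replaced the stateful loop with break and a mutated accumulator list by a recursive take-while that builds the prefix front-to-back by consing, threading only the previous element.
import Mathlib
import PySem

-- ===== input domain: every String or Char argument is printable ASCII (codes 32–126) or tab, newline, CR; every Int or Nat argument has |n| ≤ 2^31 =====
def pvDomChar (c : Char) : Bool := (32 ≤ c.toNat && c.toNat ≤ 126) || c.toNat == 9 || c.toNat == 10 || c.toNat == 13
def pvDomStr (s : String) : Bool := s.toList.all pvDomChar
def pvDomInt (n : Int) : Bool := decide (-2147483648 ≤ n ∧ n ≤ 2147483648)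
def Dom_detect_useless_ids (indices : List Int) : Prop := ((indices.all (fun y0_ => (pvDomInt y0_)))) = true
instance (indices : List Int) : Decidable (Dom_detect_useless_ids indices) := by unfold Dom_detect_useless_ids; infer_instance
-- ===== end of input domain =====

-- B replaces A's break-loop with mutated accumulator by a recursive take-while that conses the prefix; alternative decomposition, same cost.


-- ===== PORT A =====
-- A's for-loop with break: recursion over the list carrying `last` and the accumulator `good_indices`.
def detect_useless_ids_loop (xs : List Int) (last : Int) (acc : List Int) : List Int :=
  match xs with
  | [] => acc
  | x :: rest =>
      if x - 5 > last then detect_useless_ids_loop rest x (acc ++ [x])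
      else acc

def detect_useless_ids (indices : List Int) : List Int :=
  detect_useless_ids_loop indices (-100) []

-- ===== PORT B =====
-- B's recursive helper `go(prev, rest)`.
def detect_useless_ids_go (prev : Int) (rest : List Int) : List Int :=
  match rest with
  | x :: r => if x - 5 > prev then x :: detect_useless_ids_go x r else []
  | [] => []

def detect_useless_ids_alt (indices : List Int) : List Int :=
  detect_useless_ids_go (-100) indices

-- ===== PRECONDITION & SPEC =====
def Spec_detect_useless_ids (indices : List Int) (out : List Int) : Prop := out = detect_useless_ids_alt indices
instance (indices : List Int) (out : List Int) : Decidable (Spec_detect_useless_ids indices out) := by unfold Spec_detect_useless_ids; infer_instance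

-- ===== CLAIM (what is proved, stated in full; the proofs are below) =====
def Claim_equal_detect_useless_ids : Prop := ∀ (indices : List Int), Dom_detect_useless_ids indices → Spec_detect_useless_ids indices (detect_useless_ids indices)

-- ===== LEMMAS AND PROOFS =====
theorem detect_useless_ids_loop_eq (xs : List Int) (last : Int) (acc : List Int) :
    detect_useless_ids_loop xs last acc = acc ++ detect_useless_ids_go last xs := by
  induction xs generalizing last acc with
  | nil => simp [detect_useless_ids_loop, detect_useless_ids_go]
  | cons x r ih =>
      simp only [detect_useless_ids_loop, detect_useless_ids_go]
      split <;> simp [ih]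

-- ===== VERDICT (by name: the statement is the Claim_ definition above) =====
theorem detect_useless_ids_spec : Claim_equal_detect_useless_ids := by
  intro indices _
  unfold Spec_detect_useless_ids detect_useless_ids detect_useless_ids_alt
  simp [detect_useless_ids_loop_eq]
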